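-- pv_equiv track=rewrite | github.com/Javilejoo/LabConstruccionDAFD | shuntingyard.py | expand_operators
-- ===== SOURCE A (Python) =====
-- operadores = {'+', '?', '*', '|', '.', '(', ')'}
--
-- def expand_operators(expression):
--     expanded_expression = []
--     i = 0
--
--     while i < len(expression):
--         char = expression[i]
--
--         if char == '+':
--             if expanded_expression:
--                 if expanded_expression[-1] == ')':
--                     # Manejo de paréntesis
--                     open_parens = 0
--                     j = len(expanded_expression) - 1
--                     while j >= 0:
--                         if expanded_expression[j] == ')':
--                             open_parens += 1
--                         elif expanded_expression[j] == '(':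
--                             open_parens -= 1
--                         if open_parens == 0:
--                             break
--                         j -= 1
--                     sub_expression = expanded_expression[j:]
--                     expanded_expression.extend(sub_expression)
--                     expanded_expression.append('*')
--                 else:
--                     base = expanded_expression.pop()
--                     expanded_expression.append(base)
--                     expanded_expression.append('.')
--                     expanded_expression.append(base)
--                     expanded_expression.append('*')
--             else:
--                 raise ValueError("Error de sintaxis: '+' debe estar precedido por un operando.")
--         elif char == '?':
--             if expanded_expression:
--                 base = expanded_expression.pop()
--                 expanded_expression.append('(')
--                 expanded_expression.append(base)
--                 expanded_expression.append('|')
--                 expanded_expression.append('ε')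
--                 expanded_expression.append(')')
--             else:
--                 raise ValueError("Error de sintaxis: '?' debe estar precedido por un operando.")
--         else:
--             # Insertar concatenación si es necesario
--             if (expanded_expression and expanded_expression[-1] not in operadores and char not in operadores) or \
--                (expanded_expression and expanded_expression[-1] in [')', '*'] and char not in operadores) or \
--                (expanded_expression and expanded_expression[-1].isalnum() and char == '(') or \
--                (expanded_expression and expanded_expression[-1] == ')' and char not in operadores):
--                 expanded_expression.append('.')
--             expanded_expression.append(char)
--
--         i += 1
--
--     return ''.join(expanded_expression).replace('()', '')
-- ===== SOURCE B (Python) =====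
-- operadores = {'+', '?', '*', '|', '.', '(', ')'}
--
-- def expand_operators(expression):
--     out = []     # list of (char, match) pairs; match = index of matching '(' for a ')'
--     opens = []   # stack of indices of currently-unmatched '(' in out
--
--     def emit(c):
--         m = None
--         if c == '(':
--             opens.append(len(out))
--         elif c == ')':
--             if opens:
--                 m = opens.pop()
--         out.append((c, m))
--
--     def pop():
--         c, m = out.pop()
--         if c == '(':
--             opens.pop()
--         elif c == ')' and m is not None:
--             opens.append(m)
--         return c
--
--     for c in expression:
--         if c == '+':
--             top, m = out[-1]
--             if top == ')':
--                 j = m if m is not None else len(out) - 1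
--                 block = [p for p, _ in out[j:]]
--                 for p in block:
--                     emit(p)
--                 emit('*')
--             else:
--                 base = pop()
--                 emit(base); emit('.'); emit(base); emit('*')
--         elif c == '?':
--             base = pop()
--             emit('('); emit(base); emit('|'); emit('ε'); emit(')')
--         else:
--             if out:
--                 p = out[-1][0]
--                 if (c not in operadores and (p not in operadores or p in (')', '*'))) \
--                    or (c == '(' and p.isalnum()):
--                     emit('.')
--             emit(c)
--     return ''.join(p for p, _ in out).replace('()', '')
-- ===== Notes on version B (the rewrite author's own statement) =====
-- stated objective: alternative
-- what changed: B maintains a stack of open-parenthesis indices while emitting, storing with each emitted closing parenthesis the index of its matching opening one, so the plus-on-group case finds the block to duplicate by a direct lookup instead of A's backward balance-counting rescan of the accumulator.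
import Mathlib
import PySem

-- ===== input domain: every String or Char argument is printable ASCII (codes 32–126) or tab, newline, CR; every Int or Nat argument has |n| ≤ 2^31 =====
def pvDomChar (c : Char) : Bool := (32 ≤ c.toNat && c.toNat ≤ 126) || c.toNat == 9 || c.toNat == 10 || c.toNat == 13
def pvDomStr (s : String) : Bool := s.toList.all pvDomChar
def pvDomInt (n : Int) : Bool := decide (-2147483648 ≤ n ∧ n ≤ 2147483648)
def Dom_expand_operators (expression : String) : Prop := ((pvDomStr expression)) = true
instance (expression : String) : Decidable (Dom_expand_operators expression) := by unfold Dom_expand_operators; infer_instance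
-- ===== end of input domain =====

-- B replaces A's backward matching-paren rescan by a forward-maintained stack of open-paren
-- indices (each emitted ')' is stored with its matching index); objective: alternative — a
-- different algorithm of similar measured cost, equal return value wherever A returns.

-- ===== PORT A =====

-- Python: operadores = {'+','?','*','|','.','(',')'} — membership test in a literal set
def pvOp (c : Char) : Bool :=
  c == '+' || c == '?' || c == '*' || c == '|' || c == '.' || c == '(' || c == ')'

-- A's inner while loop: j from out.length-1 downwards, open_parens counter; returns j (or -1
-- when the loop runs off the left end, exactly Python's j == -1 after the loop).
-- the open_parens update of A's inner loop
def pvAdj (c : Char) (bal : Int) : Int :=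
  if c == ')' then bal + 1 else if c == '(' then bal - 1 else bal

def pvScanGo (out : List Char) (j : Nat) (bal : Int) : Int :=
  if pvAdj (out.getD j ' ') bal = 0 then (j : Int)   -- out.getD j = expanded_expression[j] (j in range whenever A runs this)
  else match j with
    | 0 => -1                 -- loop exits with j = -1
    | j' + 1 => pvScanGo out j' (pvAdj (out.getD j ' ') bal)

-- one iteration of A's while-loop over the input characters
def pvStepA (out : List Char) (c : Char) : List Char :=
  if c = '+' then
    match out.getLast? with
    | none => out             -- Python raises ValueError here; excluded by Pre_
    | some last =>
      if last = ')' then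
        let j := pvScanGo out (out.length - 1) 0
        let sub := PySem.List.slice out (some j) none    -- expanded_expression[j:]
        out ++ sub ++ ['*']
      else
        out.dropLast ++ [last, '.', last, '*']           -- pop then append base . base *
  else if c = '?' then
    match out.getLast? with
    | none => out             -- Python raises ValueError here; excluded by Pre_
    | some base => out.dropLast ++ ['(', base, '|', 'ε', ')']
  else
    match out.getLast? with
    | none => out ++ [c]      -- all four 'expanded_expression and …' guards are false
    | some p =>
      if (!pvOp p && !pvOp c) || ((p == ')' || p == '*') && !pvOp c)
         || (PySem.Chars.isalnum p && c == '(') || (p == ')' && !pvOp c) then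
        out ++ ['.', c]
      else out ++ [c]

def expand_operators (expression : String) : String :=
  let out := expression.toList.foldl pvStepA []
  PySem.Str.replace (String.ofList out) "()" ""

-- ===== PORT B =====

-- B's state: the output as (char, match) pairs — match = index of the matching '(' for a ')'
-- — together with the stack of indices of currently-unmatched '('.
def pvEmit (st : List (Char × Option Nat) × List Nat) (c : Char) :
    List (Char × Option Nat) × List Nat :=
  if c = '(' then (st.1 ++ [(c, none)], st.1.length :: st.2)
  else if c = ')' then
    match st.2 with
    | [] => (st.1 ++ [(c, none)], [])
    | m :: rest => (st.1 ++ [(c, some m)], rest)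
  else (st.1 ++ [(c, none)], st.2)

def pvPop (st : List (Char × Option Nat) × List Nat) :
    Char × (List (Char × Option Nat) × List Nat) :=
  match st.1.getLast? with
  | none => (' ', st)         -- Python raises IndexError here; excluded by Pre_
  | some (c, m) =>
    let out' := st.1.dropLast
    if c = '(' then (c, (out', st.2.tail))
    else if c = ')' then
      match m with
      | some k => (c, (out', k :: st.2))
      | none => (c, (out', st.2))
    else (c, (out', st.2))

def pvStepB (st : List (Char × Option Nat) × List Nat) (c : Char) :
    List (Char × Option Nat) × List Nat :=
  if c = '+' then
    match st.1.getLast? with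
    | none => st              -- out[-1] raises IndexError; excluded by Pre_
    | some (top, m) =>
      if top = ')' then
        let j := m.getD (st.1.length - 1)
        let block := (st.1.drop j).map Prod.fst
        pvEmit (block.foldl pvEmit st) '*'
      else
        let p := pvPop st
        pvEmit (pvEmit (pvEmit (pvEmit p.2 p.1) '.') p.1) '*'
  else if c = '?' then
    let p := pvPop st
    pvEmit (pvEmit (pvEmit (pvEmit (pvEmit p.2 '(') p.1) '|') 'ε') ')'
  else
    let st1 :=
      match st.1.getLast? with
      | none => st
      | some (p, _) =>
        if (!pvOp c && (!pvOp p || p == ')' || p == '*')) || (c == '(' && PySem.Chars.isalnum p)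
        then pvEmit st '.' else st
    pvEmit st1 c

def expand_operators_alt (expression : String) : String :=
  let st := expression.toList.foldl pvStepB ([], [])
  PySem.Str.replace (String.ofList (st.1.map Prod.fst)) "()" ""

-- ===== PRECONDITION & SPEC =====
-- Pre_ excludes exactly the inputs on which A raises ValueError: a leading '+' or '?'
-- (the accumulator is empty only before the first character is consumed).
def Pre_expand_operators (expression : String) : Prop :=
  expression.toList.head? ≠ some '+' ∧ expression.toList.head? ≠ some '?'
instance (expression : String) : Decidable (Pre_expand_operators expression) := by
  unfold Pre_expand_operators; infer_instance

def pvWitness_expand_operators : String := "(ab)+c?"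

def Spec_expand_operators (expression : String) (out : String) : Prop :=
  out = expand_operators_alt expression
instance (expression : String) (out : String) : Decidable (Spec_expand_operators expression out) := by
  unfold Spec_expand_operators; infer_instance

-- ===== CLAIM (what is proved, stated in full; the proofs are below) =====
def Claim_equal_expand_operators : Prop := ∀ (expression : String), Dom_expand_operators expression → Pre_expand_operators expression → Spec_expand_operators expression (expand_operators expression)

-- ===== LEMMAS AND PROOFS =====

-- B's state reached from the empty state by emitting the characters of `out`
def pvAnnot (out : List Char) : List (Char × Option Nat) × List Nat :=
  out.foldl pvEmit ([], [])

theorem pvEmit_fst (st : List (Char × Option Nat) × List Nat) (c : Char) :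
    (pvEmit st c).1.map Prod.fst = st.1.map Prod.fst ++ [c] := by
  obtain ⟨o, S⟩ := st
  unfold pvEmit
  split_ifs <;> cases S <;> simp

theorem pvAnnot_fst (out : List Char) : (pvAnnot out).1.map Prod.fst = out := by
  suffices h : ∀ (cs : List Char) (st : List (Char × Option Nat) × List Nat),
      (cs.foldl pvEmit st).1.map Prod.fst = st.1.map Prod.fst ++ cs by
    simpa using h out ([], [])
  intro cs
  induction cs with
  | nil => intro st; simp
  | cons c cs ih => intro st; simp [ih, pvEmit_fst]

theorem pvAnnot_append (out l : List Char) :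
    pvAnnot (out ++ l) = l.foldl pvEmit (pvAnnot out) := by
  simp [pvAnnot, List.foldl_append]

theorem pvPop_emit (st : List (Char × Option Nat) × List Nat) (c : Char) :
    pvPop (pvEmit st c) = (c, st) := by
  obtain ⟨o, S⟩ := st
  unfold pvEmit pvPop
  split_ifs with h1 h2 <;> cases S <;> simp_all

-- the match stored with the character pvEmit appends
theorem pvEmit_getLast (st : List (Char × Option Nat) × List Nat) (c : Char) :
    (pvEmit st c).1.getLast? = some (c, if c = ')' then st.2.head? else none) := by
  obtain ⟨o, S⟩ := st
  unfold pvEmit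
  split_ifs with h1 h2 <;> cases S <;> simp_all

theorem pvEmit_stack (st : List (Char × Option Nat) × List Nat) (c : Char) :
    (pvEmit st c).2 = if c = '(' then st.1.length :: st.2
                      else if c = ')' then st.2.tail else st.2 := by
  obtain ⟨o, S⟩ := st
  unfold pvEmit
  split_ifs <;> cases S <;> simp_all

-- value A's backward scan produces, phrased through B's stack
def pvOptIdx (S : List Nat) (n : Nat) : Int :=
  match S[n]? with
  | some k => (k : Int)
  | none => -1

theorem pvScanGo_restrict (ys : List Char) (c : Char) :
    ∀ (j : Nat), j < ys.length → ∀ b, pvScanGo (ys ++ [c]) j b = pvScanGo ys j b := by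
  intro j
  induction j with
  | zero =>
    intro hj b
    unfold pvScanGo
    rw [List.getD_append _ _ _ _ hj]
  | succ j ih =>
    intro hj b
    unfold pvScanGo
    rw [List.getD_append _ _ _ _ hj]
    split_ifs with h
    · rfl
    · exact ih (by omega) _

theorem pvScanGo_stack (out : List Char) :
    ∀ (b : Int), 1 ≤ b →
      pvScanGo out (out.length - 1) b = pvOptIdx (pvAnnot out).2 (b - 1).toNat := by
  induction out using List.reverseRecOn with
  | nil =>
    intro b hb
    unfold pvScanGo
    have : ¬ (pvAdj (([] : List Char).getD 0 ' ') b = 0) := by simp [pvAdj]; omega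
    simp only [List.length_nil, this, if_false]
    simp [pvAnnot, pvOptIdx]
  | append_singleton ys c ih =>
    intro b hb
    have hlen : (ys ++ [c]).length - 1 = ys.length := by simp
    have hget : (ys ++ [c]).getD ys.length ' ' = c := by
      simp [List.getD]
    have hstack : (pvAnnot (ys ++ [c])).2 =
        if c = '(' then (pvAnnot ys).1.length :: (pvAnnot ys).2
        else if c = ')' then (pvAnnot ys).2.tail else (pvAnnot ys).2 := by
      rw [pvAnnot_append]; simp [pvEmit_stack]
    have hlen1 : (pvAnnot ys).1.length = ys.length := by
      have := congrArg List.length (pvAnnot_fst ys); simpa using this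
    have hcont : ∀ b', 1 ≤ b' →
        (match ys.length with
          | 0 => (-1 : Int)
          | j' + 1 => pvScanGo (ys ++ [c]) j' b') =
        pvOptIdx (pvAnnot ys).2 (b' - 1).toNat := by
      intro b' hb'
      by_cases hys : ys = []
      · subst hys
        simp [pvAnnot, pvOptIdx]
      · obtain ⟨k, hk⟩ : ∃ k, ys.length = k + 1 :=
          ⟨ys.length - 1, by cases ys <;> simp_all⟩
        rw [hk]
        show pvScanGo (ys ++ [c]) k b' = _
        rw [show k = ys.length - 1 from by omega]
        rw [pvScanGo_restrict ys c _ (by omega) b']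
        exact ih b' hb'
    rw [hlen]
    unfold pvScanGo
    rw [hget, hstack]
    by_cases hc1 : c = ')'
    · have hadj : pvAdj c b = b + 1 := by simp [pvAdj, hc1]
      have hcne : ¬ (c = '(') := by simp [hc1]
      rw [hadj]
      have hne : ¬ (b + 1 = 0) := by omega
      rw [if_neg hne, if_neg hcne, if_pos hc1]
      rw [hcont (b + 1) (by omega)]
      unfold pvOptIdx
      rw [List.getElem?_tail]
      congr 2
      omega
    · by_cases hc2 : c = '('
      · have hadj : pvAdj c b = b - 1 := by simp [pvAdj, hc2]
        rw [hadj, if_pos hc2]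
        by_cases hb1 : b = 1
        · have hz : b - 1 = 0 := by omega
          rw [if_pos hz]
          simp [hb1, pvOptIdx, hlen1]
        · have hne : ¬ (b - 1 = 0) := by omega
          rw [if_neg hne]
          rw [hcont (b - 1) (by omega)]
          unfold pvOptIdx
          have h1 : (b - 1).toNat = (b - 1 - 1).toNat + 1 := by omega
          rw [h1, List.getElem?_cons_succ]
      · have hadj : pvAdj c b = b := by simp [pvAdj, hc1, hc2]
        rw [hadj]
        have hne : ¬ (b = 0) := by omega
        rw [if_neg hne, if_neg hc2, if_neg hc1]
        exact hcont b hb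

-- the two concatenation-dot conditions are the same Boolean function
theorem pvDot_cond (x1 x2 x3 x4 x5 x6 : Bool) :
    ((!x2 && (!x1 || x3 || x4)) || (x6 && x5)) =
    ((!x1 && !x2) || ((x3 || x4) && !x2) || (x5 && x6) || (x3 && !x2)) := by
  cases x1 <;> cases x2 <;> cases x3 <;> cases x4 <;> cases x5 <;> cases x6 <;> rfl

-- A's scan, started at the final ')' with open_parens = 0, lands on the top of B's stack (or -1)
theorem pvScan_top (ys : List Char) :
    pvScanGo (ys ++ [')']) ((ys ++ [')']).length - 1) 0 = pvOptIdx (pvAnnot ys).2 0 := by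
  have hlen : (ys ++ [')']).length - 1 = ys.length := by simp
  rw [hlen]
  unfold pvScanGo
  have hget : (ys ++ [')']).getD ys.length ' ' = ')' := by
    simp [List.getD]
  rw [hget]
  have hadj : pvAdj ')' 0 = 1 := by simp [pvAdj]
  rw [hadj, if_neg (by norm_num)]
  by_cases hys : ys = []
  · subst hys; simp [pvAnnot, pvOptIdx]
  · obtain ⟨k, hk⟩ : ∃ k, ys.length = k + 1 := ⟨ys.length - 1, by cases ys <;> simp_all⟩
    rw [hk]
    show pvScanGo (ys ++ [')']) k 1 = _
    rw [show k = ys.length - 1 from by omega, pvScanGo_restrict ys _ _ (by omega),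
        pvScanGo_stack ys 1 (by norm_num)]
    norm_num

theorem pvStep_comm (out : List Char) (c : Char) (hne : out ≠ []) :
    pvStepB (pvAnnot out) c = pvAnnot (pvStepA out c) := by
  rcases List.eq_nil_or_concat out with h | ⟨ys, l, rfl⟩
  · exact absurd h hne
  simp only [List.concat_eq_append] at hne ⊢
  have hann : pvAnnot (ys ++ [l]) = pvEmit (pvAnnot ys) l := by
    rw [pvAnnot_append]; rfl
  have hlast : (pvAnnot (ys ++ [l])).1.getLast? =
      some (l, if l = ')' then (pvAnnot ys).2.head? else none) := by
    rw [hann]; exact pvEmit_getLast _ _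
  have hfst : (pvAnnot (ys ++ [l])).1.map Prod.fst = ys ++ [l] := pvAnnot_fst _
  have hlen1 : (pvAnnot (ys ++ [l])).1.length = ys.length + 1 := by
    have := congrArg List.length hfst; simpa using this
  have hAlast : (ys ++ [l]).getLast? = some l := by simp
  have hdropLast : (ys ++ [l]).dropLast = ys := by simp
  by_cases hcp : c = '+'
  · subst hcp
    unfold pvStepA pvStepB
    rw [if_pos rfl, if_pos rfl, hlast, hAlast]
    by_cases hl : l = ')'
    · subst hl
      simp only [reduceIte]
      -- the copied block is the same list on both sides
      have hblock : ∀ j : Nat,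
          ((pvAnnot (ys ++ [')'])).1.drop j).map Prod.fst = (ys ++ [')']).drop j := by
        intro j; rw [List.map_drop, hfst]
      rw [pvScan_top]
      rcases hS : (pvAnnot ys).2 with _ | ⟨k, S'⟩
      · have h1 : pvOptIdx [] 0 = -1 := rfl
        rw [h1, PySem.List.slice_from_neg_one]
        simp only [List.head?_nil, Option.getD_none, hlen1, hblock]
        have hlen2 : (ys ++ [')']).length - 1 = ys.length + 1 - 1 := by simp
        rw [← hlen2]
        simp [pvAnnot, List.foldl_append]
      · have h1 : pvOptIdx (k :: S') 0 = (k : Int) := rfl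
        rw [h1, PySem.List.slice_from_natCast]
        simp only [List.head?_cons, Option.getD_some, hblock]
        simp [pvAnnot, List.foldl_append]
    · simp only [if_neg hl]
      have hpop : pvPop (pvAnnot (ys ++ [l])) = (l, pvAnnot ys) := by
        rw [hann]; exact pvPop_emit _ _
      rw [hpop, hdropLast]
      show pvEmit (pvEmit (pvEmit (pvEmit (pvAnnot ys) l) '.') l) '*' = _
      rw [pvAnnot_append]
      simp [List.foldl]
  · by_cases hcq : c = '?'
    · subst hcq
      unfold pvStepA pvStepB
      rw [if_neg hcp, if_neg hcp, if_pos rfl, if_pos rfl, hAlast]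
      have hpop : pvPop (pvAnnot (ys ++ [l])) = (l, pvAnnot ys) := by
        rw [hann]; exact pvPop_emit _ _
      rw [hpop, hdropLast]
      show pvEmit (pvEmit (pvEmit (pvEmit (pvEmit (pvAnnot ys) '(') l) '|') 'ε') ')' = _
      rw [pvAnnot_append]
      simp [List.foldl]
    · unfold pvStepA pvStepB
      rw [if_neg hcp, if_neg hcp, if_neg hcq, if_neg hcq, hlast, hAlast]
      show pvEmit (if (!pvOp c && (!pvOp l || l == ')' || l == '*')
              || c == '(' && PySem.Chars.isalnum l) = true
            then pvEmit (pvAnnot (ys ++ [l])) '.' else pvAnnot (ys ++ [l])) c =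
          pvAnnot (if (!pvOp l && !pvOp c || (l == ')' || l == '*') && !pvOp c
              || PySem.Chars.isalnum l && c == '(' || l == ')' && !pvOp c) = true
            then ys ++ [l] ++ ['.', c] else ys ++ [l] ++ [c])
      rw [pvDot_cond (pvOp l) (pvOp c) (l == ')') (l == '*') (PySem.Chars.isalnum l) (c == '(')]
      split_ifs with hd <;> simp [pvAnnot, List.foldl_append]

theorem pvStepA_ne_nil (out : List Char) (c : Char) (hne : out ≠ []) :
    pvStepA out c ≠ [] := by
  rcases List.eq_nil_or_concat out with h | ⟨ys, l, rfl⟩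
  · exact absurd h hne
  simp only [List.concat_eq_append] at hne ⊢
  have hAlast : (ys ++ [l]).getLast? = some l := by simp
  unfold pvStepA
  split_ifs <;> simp [hAlast] <;> split_ifs <;> simp

theorem pvFold (cs : List Char) : ∀ (out : List Char), out ≠ [] →
    cs.foldl pvStepB (pvAnnot out) = pvAnnot (cs.foldl pvStepA out) := by
  induction cs with
  | nil => intro out h; rfl
  | cons c cs ih =>
    intro out h
    simp only [List.foldl_cons]
    rw [pvStep_comm out c h]
    exact ih _ (pvStepA_ne_nil out c h)

-- ===== VERDICT (by name: the statement is the Claim_ definition above) =====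
theorem expand_operators_spec : Claim_equal_expand_operators := by
  unfold Claim_equal_expand_operators
  intro s _hd hpre
  unfold Spec_expand_operators expand_operators expand_operators_alt
  obtain ⟨h1, h2⟩ := hpre
  rcases hs : s.toList with _ | ⟨c, rest⟩
  · simp only [List.foldl_nil, List.map_nil]
  · have hc1 : c ≠ '+' := by intro e; rw [hs, e] at h1; exact h1 rfl
    have hc2 : c ≠ '?' := by intro e; rw [hs, e] at h2; exact h2 rfl
    have hA1 : pvStepA [] c = [c] := by
      unfold pvStepA; rw [if_neg hc1, if_neg hc2]; rfl
    have hB1 : pvStepB ([], []) c = pvAnnot [c] := by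
      unfold pvStepB; rw [if_neg hc1, if_neg hc2]; rfl
    simp only [List.foldl_cons, hA1, hB1]
    rw [pvFold rest [c] (by simp), pvAnnot_fst]
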